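-- pv_equiv track=rewrite | github.com/ting1011/2026-python | weeks/week-10/solutions/1114405022/QUESTION-10252-easy-handtyped.py | solve
-- ===== SOURCE A (Python) =====
-- from collections import Counter
--
-- def solve(data: str) -> str:
--     lines = data.splitlines()
--     out = []
--
--     i = 0
--     while i + 1 < len(lines):
--         a = lines[i]
--         b = lines[i + 1]
--         i += 2
--
--         # 統計字元頻率。
--         ca = Counter(a)
--         cb = Counter(b)
--
--         # 取交集字元，依序輸出最小重複次數。
--         parts = []
--         for ch in sorted(ca.keys() & cb.keys()):
--             parts.append(ch * min(ca[ch], cb[ch]))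
--
--         out.append("".join(parts))
--
--     return "\n".join(out)
-- ===== SOURCE B (Python) =====
-- def solve(data: str) -> str:
--     lines = data.splitlines()
--     out = []
--     i = 0
--     while i + 1 < len(lines):
--         sa = sorted(lines[i])
--         sb = sorted(lines[i + 1])
--         i += 2
--         pa = 0
--         pb = 0
--         parts = []
--         while pa < len(sa) and pb < len(sb):
--             x = sa[pa]
--             y = sb[pb]
--             if x < y:
--                 pa += 1
--             elif y < x:
--                 pb += 1
--             else:
--                 parts.append(x)
--                 pa += 1
--                 pb += 1
--         out.append("".join(parts))
--     return "\n".join(out)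
-- ===== Notes on version B (the rewrite author's own statement) =====
-- stated objective: alternative
-- what changed: Replaces the Counter-based multiset intersection (count both lines, intersect key sets, sort the keys, emit each key min-count times) by a two-pointer merge of the two sorted character lists, which yields the common characters with minimum multiplicity directly in sorted order.
import Mathlib
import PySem

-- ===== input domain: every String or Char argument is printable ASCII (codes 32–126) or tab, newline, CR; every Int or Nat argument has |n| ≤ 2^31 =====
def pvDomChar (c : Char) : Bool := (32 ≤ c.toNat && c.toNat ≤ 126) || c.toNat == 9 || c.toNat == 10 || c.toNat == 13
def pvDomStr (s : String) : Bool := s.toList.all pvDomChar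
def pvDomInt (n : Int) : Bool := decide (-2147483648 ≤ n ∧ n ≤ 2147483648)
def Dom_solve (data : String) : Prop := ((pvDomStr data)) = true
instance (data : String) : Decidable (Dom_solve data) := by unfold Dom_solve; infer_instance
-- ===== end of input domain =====

-- B replaces A's Counter-based multiset intersection (count both lines, intersect the key
-- sets, sort the keys, emit each key min-count times) by a two-pointer merge of the two
-- sorted character lists — an alternative algorithm of similar cost, no Counter needed.

-- ===== PORT A =====
-- one iteration of A's while loop: Counter both lines, sorted common keys, ch * min(counts)
def solvePairA (a b : List Char) : List Char :=
  let ca := PySem.Dict.counter a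
  let cb := PySem.Dict.counter b
  -- ca.keys() & cb.keys(): key views intersected as sets (keys are distinct, so ca.keys IS set(a));
  -- the set's own iteration order is irrelevant because sorted() normalises it
  let common : PySem.Set Char := PySem.Set.inter ca.keys cb.keys
  let parts := (PySem.List.sorted common (fun c => c)).foldl
      (fun ps ch => ps ++ [List.replicate (min (ca.getD ch 0) (cb.getD ch 0)).toNat ch]) []
  PySem.Chars.join [] parts

-- the while loop: i advances by 2 while i+1 < len(lines), so consume lines two at a time
def solveLoopA : List (List Char) → List (List Char)
  | a :: b :: rest => solvePairA a b :: solveLoopA rest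
  | _ => []

def solve (data : String) : String :=
  String.mk (PySem.Chars.join ['\n'] (solveLoopA (PySem.Chars.splitlines data.toList)))

-- ===== PORT B =====
-- the inner while loop of Source B: two-pointer merge of two sorted char lists,
-- emitting the character when both pointers agree
def mergeCommon : List Char → List Char → List Char
  | x :: xs, y :: ys =>
      if x < y then mergeCommon xs (y :: ys)
      else if y < x then mergeCommon (x :: xs) ys
      else x :: mergeCommon xs ys
  | _, _ => []

def solvePairB (a b : List Char) : List Char :=
  mergeCommon (PySem.List.sorted a (fun c => c)) (PySem.List.sorted b (fun c => c))

def solveLoopB : List (List Char) → List (List Char)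
  | a :: b :: rest => solvePairB a b :: solveLoopB rest
  | _ => []

def solve_alt (data : String) : String :=
  String.mk (PySem.Chars.join ['\n'] (solveLoopB (PySem.Chars.splitlines data.toList)))

-- ===== PRECONDITION & SPEC =====
def Spec_solve (data : String) (out : String) : Prop := out = solve_alt data
instance (data : String) (out : String) : Decidable (Spec_solve data out) := by unfold Spec_solve; infer_instance

-- ===== CLAIM (what is proved, stated in full; the proofs are below) =====
def Claim_equal_solve : Prop := ∀ (data : String), Dom_solve data → Spec_solve data (solve data)

-- ===== LEMMAS AND PROOFS =====

-- joining with the empty separator is flattening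
lemma join_nil_sep (l : List (List Char)) : PySem.Chars.join [] l = l.flatten := by
  induction l with
  | nil => simp [PySem.Chars.join_nil]
  | cons x xs ih =>
      cases xs with
      | nil => simp [PySem.Chars.join_singleton]
      | cons y ys => rw [PySem.Chars.join_cons_cons, ih]; simp

-- the merge output is a sublist of its first argument (hence sorted when it is)
lemma mergeCommon_sublist (xs ys : List Char) : List.Sublist (mergeCommon xs ys) xs := by
  fun_induction mergeCommon xs ys with
  | case1 x xs y ys hlt ih => exact ih.cons x
  | case2 x xs y ys hlt hgt ih => exact ih
  | case3 x xs y ys hlt hgt ih => exact ih.cons₂ x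
  | case4 xs ys h => simp

-- a sorted list headed by y contains nothing below y
lemma count_eq_zero_of_lt_head {y c : Char} {ys : List Char}
    (h : (y :: ys).Pairwise (· ≤ ·)) (hc : c < y) : List.count c (y :: ys) = 0 := by
  rw [List.count_eq_zero]
  intro hm
  rcases List.mem_cons.mp hm with rfl | hm
  · exact absurd hc (lt_irrefl _)
  · exact absurd (List.rel_of_pairwise_cons h hm) (not_le.mpr hc)

-- counts in the merge of two sorted lists are the pointwise minima
lemma count_mergeCommon (xs ys : List Char) :
    xs.Pairwise (· ≤ ·) → ys.Pairwise (· ≤ ·) →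
    ∀ c, List.count c (mergeCommon xs ys) = min (List.count c xs) (List.count c ys) := by
  fun_induction mergeCommon xs ys with
  | case1 x xs y ys hlt ih =>
      intro hx hy c
      rw [ih hx.of_cons hy]
      by_cases hcx : c = x
      · subst hcx
        rw [count_eq_zero_of_lt_head hy hlt]
        simp
      · simp [List.count_cons, Ne.symm hcx]
  | case2 x xs y ys hlt hgt ih =>
      intro hx hy c
      rw [ih hx hy.of_cons]
      by_cases hcy : c = y
      · subst hcy
        rw [count_eq_zero_of_lt_head hx hgt]
        simp
      · simp [List.count_cons, Ne.symm hcy]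
  | case3 x xs y ys hlt hgt ih =>
      intro hx hy c
      have hxy : x = y := le_antisymm (not_lt.mp hgt) (not_lt.mp hlt)
      subst hxy
      by_cases hcx : c = x
      · subst hcx
        simp only [List.count_cons_self, ih hx.of_cons hy.of_cons c]
        omega
      · simp [Ne.symm hcx, ih hx.of_cons hy.of_cons c]
  | case4 xs ys h =>
      intro _ _ c
      rcases xs with _ | ⟨x, xs⟩
      · simp
      rcases ys with _ | ⟨y, ys⟩
      · simp
      exact (h x xs y ys rfl rfl).elim

-- counts in A's "each common key, min-count times" concatenation
lemma count_flatMap_replicate (m : Char → Nat) (ks : List Char) (hnd : ks.Nodup) (c : Char) :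
    List.count c (ks.flatMap fun k => List.replicate (m k) k) =
      if c ∈ ks then m c else 0 := by
  induction ks with
  | nil => simp
  | cons k ks ih =>
      simp only [List.flatMap_cons, List.count_append, List.count_replicate,
        ih hnd.of_cons, List.mem_cons]
      by_cases hck : k = c
      · subst hck
        have : k ∉ ks := (List.nodup_cons.mp hnd).1
        simp [this]
      · simp [hck, Ne.symm hck]

-- A's concatenation over strictly increasing keys is sorted
lemma pairwise_flatMap_replicate (m : Char → Nat) (ks : List Char)
    (hs : ks.Pairwise (· < ·)) :
    (ks.flatMap fun k => List.replicate (m k) k).Pairwise (· ≤ ·) := by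
  induction ks with
  | nil => simp
  | cons k ks ih =>
      simp only [List.flatMap_cons]
      rw [List.pairwise_append]
      refine ⟨List.pairwise_replicate.mpr (Or.inr le_rfl), ih hs.of_cons, ?_⟩
      intro a ha b hb
      rcases List.eq_of_mem_replicate ha with rfl
      simp only [List.mem_flatMap] at hb
      obtain ⟨k', hk', hb⟩ := hb
      rcases List.eq_of_mem_replicate hb with rfl
      exact le_of_lt (List.rel_of_pairwise_cons hs hk')

-- the heart: A's pair body equals B's pair body
lemma pair_eq (a b : List Char) : solvePairA a b = solvePairB a b := by
  simp only [solvePairA, solvePairB]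
  rw [PySem.List.foldl_append_singleton_eq_map, List.nil_append, join_nil_sep,
    ← List.flatMap_def]
  set ks := PySem.List.sorted (PySem.Set.inter (PySem.Dict.counter a).keys
    (PySem.Dict.counter b).keys) (fun c => c) with hks
  have hnd : ks.Nodup := by
    rw [hks]
    exact ((PySem.List.sorted_perm _ _ _).nodup_iff).mpr
      (PySem.Set.nodup_inter _ _ (PySem.Dict.nodup_keys_counter a))
  have hmem : ∀ c : Char, c ∈ ks ↔ c ∈ a ∧ c ∈ b := by
    intro c
    rw [hks, PySem.List.mem_sorted, PySem.Set.mem_inter,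
      PySem.Dict.keys_counter, PySem.Dict.keys_counter]
    simp [PySem.Set.mem_ofList]
  have hsorted : ks.Pairwise (· < ·) := by
    have h1 : ks.Pairwise (· ≤ ·) := by
      rw [hks]; exact PySem.List.sorted_pairwise _ _
    exact (h1.and hnd).imp
      (fun h => lt_of_le_of_ne h.1 h.2)
  have hrepl : ∀ ch : Char,
      List.replicate (min ((PySem.Dict.counter a).getD ch 0)
        ((PySem.Dict.counter b).getD ch 0)).toNat ch =
      List.replicate (min (List.count ch a) (List.count ch b)) ch := by
    intro ch
    rw [PySem.Dict.getD_counter, PySem.Dict.getD_counter, ← Nat.cast_min,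
      Int.toNat_natCast]
  simp only [hrepl]
  -- both sides sorted with the same counts ⇒ equal
  have hsa := PySem.List.sorted_pairwise a (fun c => c)
  have hsb := PySem.List.sorted_pairwise b (fun c => c)
  have hcount : ∀ c : Char,
      List.count c (ks.flatMap fun ch =>
        List.replicate (min (List.count ch a) (List.count ch b)) ch) =
      List.count c (mergeCommon (PySem.List.sorted a fun c => c)
        (PySem.List.sorted b fun c => c)) := by
    intro c
    rw [count_mergeCommon _ _ hsa hsb c,
      (PySem.List.sorted_perm a (fun c => c) false).count_eq,
      (PySem.List.sorted_perm b (fun c => c) false).count_eq,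
      count_flatMap_replicate _ ks hnd c]
    by_cases hc : c ∈ ks
    · simp [hc]
    · rw [if_neg hc]
      rw [hmem c] at hc
      rcases not_and_or.mp hc with h | h
      · rw [List.count_eq_zero.mpr h]; simp
      · rw [List.count_eq_zero.mpr h]; simp
  exact List.Perm.eq_of_pairwise (fun a b _ _ h1 h2 => le_antisymm h1 h2)
    (pairwise_flatMap_replicate _ ks hsorted)
    (hsa.sublist (mergeCommon_sublist _ _))
    (List.perm_iff_count.mpr hcount)

lemma loop_eq (l : List (List Char)) : solveLoopA l = solveLoopB l := by
  fun_induction solveLoopA l with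
  | case1 a b rest ih => rw [solveLoopB, pair_eq, ih]
  | case2 l h =>
      rcases l with _ | ⟨a, l⟩
      · rfl
      rcases l with _ | ⟨b, l⟩
      · rfl
      simp_all

-- ===== VERDICT (by name: the statement is the Claim_ definition above) =====
theorem solve_spec : Claim_equal_solve := by
  intro data _
  unfold Spec_solve solve solve_alt
  rw [loop_eq]
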